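-- pv_equiv track=rewrite | github.com/neil90/spark-nyblog-mllib-stream | features.py | socialmedia_headline
-- ===== SOURCE A (Python) =====
-- def socialmedia_headline( headline):
-- 	keywords = [
-- 		'facebook', 'instagram', 'snapchat',
-- 		'twitter', 'tweet', 'hashtag'
-- 		]
--
-- 	if any(word in headline for word in keywords):
-- 		return 1
-- 	else:
-- 		return 0
-- ===== SOURCE B (Python) =====
-- def socialmedia_headline(headline):
--     KEYWORDS = ('facebook', 'instagram', 'snapchat',
--                 'twitter', 'tweet', 'hashtag')
--     for i in range(len(headline)):
--         if headline.startswith(KEYWORDS, i):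
--             return 1
--     return 0
-- ===== Notes on version B (the rewrite author's own statement) =====
-- stated objective: alternative
-- what changed: Instead of six independent substring scans via any(word in headline), B makes a single left-to-right pass over the headline, testing at each position whether any keyword starts there with one tuple-argument startswith call, returning early on the first hit.
import Mathlib
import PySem

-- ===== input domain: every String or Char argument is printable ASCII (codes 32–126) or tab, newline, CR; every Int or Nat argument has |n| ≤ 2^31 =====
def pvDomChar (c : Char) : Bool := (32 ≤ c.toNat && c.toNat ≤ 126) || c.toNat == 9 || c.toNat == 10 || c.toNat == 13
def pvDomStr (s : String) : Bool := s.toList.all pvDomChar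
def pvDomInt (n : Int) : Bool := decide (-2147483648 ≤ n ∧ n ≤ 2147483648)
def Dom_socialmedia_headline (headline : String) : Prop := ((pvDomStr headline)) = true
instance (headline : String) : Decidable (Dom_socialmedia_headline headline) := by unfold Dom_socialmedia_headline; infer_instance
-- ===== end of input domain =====

-- B replaces A's six independent `word in headline` scans by one left-to-right pass
-- testing at each position whether any keyword starts there (alternative decomposition).

-- ===== PORT A =====
def socialmedia_headline (headline : String) : Int :=
  let keywords : List String :=
    ["facebook", "instagram", "snapchat", "twitter", "tweet", "hashtag"]
  if keywords.any (fun word => PySem.Str.isIn word headline) then 1 else 0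

-- ===== PORT B =====
def pvKeywordsB : List (List Char) :=
  [("facebook" : String).toList, ("instagram" : String).toList, ("snapchat" : String).toList,
   ("twitter" : String).toList, ("tweet" : String).toList, ("hashtag" : String).toList]

-- the `for i in range(len(headline)): if headline.startswith(KEYWORDS, i)` loop
def pvScanB : List Char → Int
  | [] => 0
  | c :: rest =>
      if pvKeywordsB.any (fun kw => kw.isPrefixOf (c :: rest)) then 1 else pvScanB rest

def socialmedia_headline_alt (headline : String) : Int :=
  pvScanB headline.toList

-- ===== PRECONDITION & SPEC =====
def Spec_socialmedia_headline (headline : String) (out : Int) : Prop := out = socialmedia_headline_alt headline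
instance (headline : String) (out : Int) : Decidable (Spec_socialmedia_headline headline out) := by unfold Spec_socialmedia_headline; infer_instance

-- ===== CLAIM (what is proved, stated in full; the proofs are below) =====
def Claim_equal_socialmedia_headline : Prop := ∀ (headline : String), Dom_socialmedia_headline headline → Spec_socialmedia_headline headline (socialmedia_headline headline)

-- ===== LEMMAS AND PROOFS =====

theorem pv_isIn_eq_decide (w s : String) :
    PySem.Str.isIn w s = decide (w.toList <:+: s.toList) := by
  cases hb : PySem.Str.isIn w s
  · rw [eq_comm, decide_eq_false_iff_not]
    intro h
    have hc := (PySem.Str.isIn_iff_infix w s).mpr h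
    rw [hb] at hc
    exact absurd hc (by decide)
  · rw [eq_comm, decide_eq_true_eq]
    exact (PySem.Str.isIn_iff_infix w s).mp hb

theorem pvScanB_eq_infix (l : List Char) :
    pvScanB l = if pvKeywordsB.any (fun kw => decide (kw <:+: l)) then 1 else 0 := by
  induction l with
  | nil =>
      have h : pvKeywordsB.any (fun kw => decide (kw <:+: ([] : List Char))) = false := by
        simp [pvKeywordsB]
      rw [pvScanB, h, if_neg (by simp)]
  | cons c rest ih =>
      rw [pvScanB, ih]
      by_cases hpre : pvKeywordsB.any (fun kw => kw.isPrefixOf (c :: rest)) = true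
      · rw [if_pos hpre, if_pos]
        simp only [List.any_eq_true] at hpre ⊢
        obtain ⟨kw, hkw, hp⟩ := hpre
        exact ⟨kw, hkw, by
          simp only [decide_eq_true_eq]
          exact List.IsPrefix.isInfix (List.isPrefixOf_iff_prefix.mp hp)⟩
      · rw [if_neg hpre]
        congr 1
        simp only [List.any_eq_true, decide_eq_true_eq, List.infix_cons_iff]
        rw [eq_iff_iff]
        constructor
        · rintro ⟨kw, hkw, hi⟩; exact ⟨kw, hkw, Or.inr hi⟩
        · rintro ⟨kw, hkw, hp | hi⟩
          · exact absurd (List.any_eq_true.mpr ⟨kw, ⟨hkw, List.isPrefixOf_iff_prefix.mpr hp⟩⟩ :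
                (pvKeywordsB.any fun kw => kw.isPrefixOf (c :: rest)) = true) hpre
          · exact ⟨kw, hkw, hi⟩

-- ===== VERDICT (by name: the statement is the Claim_ definition above) =====
theorem socialmedia_headline_spec : Claim_equal_socialmedia_headline := by
  intro headline _
  unfold Spec_socialmedia_headline socialmedia_headline socialmedia_headline_alt
  rw [pvScanB_eq_infix]
  simp only [pv_isIn_eq_decide, pvKeywordsB, List.any_cons, List.any_nil]
  rfl
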